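-- pv_equiv track=rewrite | github.com/jcalandra/morfos | src/oracle_version/algo_segmentation_vmo.py | cognitive_algorithm
-- ===== SOURCE A (Python) =====
-- def cognitive_algorithm(data):
--     """ This function creates the matrix that represents the formal diagram produce by the adequated string char. It
--     returns the matrix corresponding to the formal diagram and the len of the string."""
--     len_data = len(data) - 1
--     nb_mat = 1
--     new_mat = [1 for i in range(len_data)]
--     mtx = [new_mat]
--     mtx[0][0] = 0
--     for i_hop in range(1, len_data):
--         j_mat = data[i_hop + 1] - 1
--         if j_mat > len(mtx) - 1:
--             nb_mat = nb_mat + 1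
--             new_mat = [1 for i in range(len_data)]
--             mtx.append(new_mat)
--             mtx[nb_mat - 1][i_hop] = 0
--         else:
--             mtx[j_mat][i_hop] = 0
--     return mtx, len_data
-- ===== SOURCE B (Python) =====
-- def cognitive_algorithm(data):
--     """Functional variant: compute, per column, the row index of its single 0
--     (branch-free via min/max), then generate the whole matrix by comprehension
--     from that assignment -- no matrix mutation at all."""
--     len_data = len(data) - 1
--     nb = 1
--     zrow = [0]
--     for i_hop in range(1, len_data):
--         r = min(data[i_hop + 1] - 1, nb)
--         nb = max(nb, r + 1)
--         zrow.append(r)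
--     matrix = [[0 if zrow[c] == r else 1 for c in range(len_data)] for r in range(nb)]
--     return matrix, len_data
-- ===== Notes on version B (the rewrite author's own statement) =====
-- stated objective: alternative
-- what changed: B never builds or mutates a matrix during the scan: it computes a per-column zero-row assignment with branch-free min/max arithmetic and then generates the whole matrix functionally by a comprehension from that assignment, whereas A grows a matrix row by row and mutates cells in place.
-- outside the precondition, e.g. on cognitive_algorithm([2, 9, 0, 5]): A returns ([[0, 0, 1], [1, 1, 0]], 3), B returns ([[0, 1, 1], [1, 1, 0]], 3); on cognitive_algorithm([0, 0, 0, 0]): A returns ([[0, 0, 0]], 3), B returns ([[0, 1, 1]], 3); on cognitive_algorithm([0]): A raises IndexError, B returns ([[]], 0)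
import Mathlib
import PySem

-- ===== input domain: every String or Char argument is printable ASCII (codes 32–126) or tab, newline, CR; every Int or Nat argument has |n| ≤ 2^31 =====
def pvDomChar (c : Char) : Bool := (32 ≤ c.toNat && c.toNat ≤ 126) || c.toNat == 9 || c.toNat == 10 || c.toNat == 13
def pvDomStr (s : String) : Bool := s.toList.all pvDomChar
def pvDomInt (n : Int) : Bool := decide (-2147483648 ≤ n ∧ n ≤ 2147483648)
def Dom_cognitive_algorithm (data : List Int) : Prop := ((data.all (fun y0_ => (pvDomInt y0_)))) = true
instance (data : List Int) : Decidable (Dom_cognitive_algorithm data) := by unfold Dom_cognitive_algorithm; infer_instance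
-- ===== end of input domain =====

-- B drops A's mutated, row-by-row grown matrix entirely: it computes, per column, the row index of
-- that column's 0 (branch-free, via min/max) and then generates the whole matrix functionally by a
-- comprehension from that assignment; same result as A on Pre_ ("alternative").

-- ===== PORT A =====
-- A-side helper: mtx[r][c] = 0 with Python indexing (exact for in-range indices; Pre_ keeps them in range)
def pvSetCell (m : List (List Int)) (r c : Int) : List (List Int) :=
  PySem.List.pySetD m r (PySem.List.pySetD (PySem.List.pyGetD m r []) c 0)

-- A's loop body
def pvStepA (data : List Int) (st : List (List Int) × Int) (i_hop : Int) : List (List Int) × Int :=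
  let j_mat := PySem.List.pyGetD data (i_hop + 1) 0 - 1
  if j_mat > (st.1.length : Int) - 1 then
    let nb_mat := st.2 + 1
    let mtx' := st.1 ++ [List.replicate ((data.length : Int) - 1).toNat 1]
    (pvSetCell mtx' (nb_mat - 1) i_hop, nb_mat)
  else
    (pvSetCell st.1 j_mat i_hop, st.2)

def cognitive_algorithm (data : List Int) : List (List Int) × Int :=
  let len_data : Int := (data.length : Int) - 1
  let mtx := pvSetCell [List.replicate len_data.toNat 1] 0 0
  let st := (PySem.List.pyRange 1 len_data 1).foldl (pvStepA data) (mtx, 1)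
  (st.1, len_data)

-- ===== PORT B =====
-- B's loop body: r = min(data[i_hop+1]-1, nb); nb = max(nb, r+1); zrow.append(r)
def pvStepB (data : List Int) (st : Int × List Int) (i_hop : Int) : Int × List Int :=
  let r := min (PySem.List.pyGetD data (i_hop + 1) 0 - 1) st.1
  (max st.1 (r + 1), st.2 ++ [r])

def cognitive_algorithm_alt (data : List Int) : List (List Int) × Int :=
  let len_data : Int := (data.length : Int) - 1
  let p := (PySem.List.pyRange 1 len_data 1).foldl (pvStepB data) (1, [0])
  let matrix := (PySem.List.pyRange 0 p.1 1).map (fun r =>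
    (PySem.List.pyRange 0 len_data 1).map (fun c =>
      if PySem.List.pyGetD p.2 c 0 = r then (0 : Int) else 1))
  (matrix, len_data)

-- ===== PRECONDITION & SPEC =====
-- Pre_ excludes data with fewer than 2 elements, where A raises IndexError on mtx[0][0], and data
-- with a non-positive value at a position ≥ 2, where A either raises IndexError or returns a matrix
-- shaped by accidental negative-index wraparound against the matrix's current (not final) height.
def Pre_cognitive_algorithm (data : List Int) : Prop :=
  2 ≤ data.length ∧ ∀ x ∈ data.drop 2, 1 ≤ x
instance (data : List Int) : Decidable (Pre_cognitive_algorithm data) := by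
  unfold Pre_cognitive_algorithm; infer_instance
def pvWitness_cognitive_algorithm : List Int := [3, 1, 1, 2]

def Spec_cognitive_algorithm (data : List Int) (out : List (List Int) × Int) : Prop := out = cognitive_algorithm_alt data
instance (data : List Int) (out : List (List Int) × Int) : Decidable (Spec_cognitive_algorithm data out) := by unfold Spec_cognitive_algorithm; infer_instance

-- ===== CLAIM (what is proved, stated in full; the proofs are below) =====
def Claim_equal_cognitive_algorithm : Prop := ∀ (data : List Int), Dom_cognitive_algorithm data → Pre_cognitive_algorithm data → Spec_cognitive_algorithm data (cognitive_algorithm data)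

-- ===== LEMMAS AND PROOFS =====

-- the row of the generated matrix for a given zero-row assignment zs (default -1 marks columns
-- not yet assigned: their entry is 1 for every row index r ≥ 0)
def pvGenRow (zs : List Int) (w : Int) (r : Int) : List Int :=
  (PySem.List.pyRange 0 w 1).map (fun c => if PySem.List.pyGetD zs c (-1) = r then 0 else 1)

def pvGen (zs : List Int) (w n : Int) : List (List Int) :=
  (PySem.List.pyRange 0 n 1).map (fun r => pvGenRow zs w r)

lemma pvGen_length (zs : List Int) (w n : Int) : (pvGen zs w n).length = n.toNat := by
  simp [pvGen, PySem.List.length_pyRange_one]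

lemma pvGenRow_length (zs : List Int) (w r : Int) : (pvGenRow zs w r).length = w.toNat := by
  simp [pvGenRow, PySem.List.length_pyRange_one]

lemma pvGetD_app (zs : List Int) (x c d : Int) (hc : 0 ≤ c) :
    PySem.List.pyGetD (zs ++ [x]) c d =
      if c < (zs.length : Int) then PySem.List.pyGetD zs c d
      else if c = (zs.length : Int) then x else d := by
  rw [PySem.List.pyGetD_of_nonneg _ _ hc]
  split_ifs with h1 h2
  · rw [PySem.List.pyGetD_of_nonneg _ _ hc]
    exact List.getD_append _ _ _ _ (by omega)
  · rw [List.getD_append_right _ _ _ _ (by omega)]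
    have h3 : c.toNat - zs.length = 0 := by omega
    simp [h3]
  · rw [List.getD_append_right _ _ _ _ (by omega)]
    exact List.getD_eq_default _ _ (by simp; omega)

lemma pvGenRow_getElem (zs : List Int) (w r : Int) (i : Nat)
    (hi : i < (pvGenRow zs w r).length) :
    (pvGenRow zs w r)[i] = if PySem.List.pyGetD zs (i : Int) (-1) = r then 0 else 1 := by
  unfold pvGenRow at hi ⊢
  rw [List.getElem_map, PySem.List.getElem_pyRange_one]
  norm_num

lemma pvGen_getElem (zs : List Int) (w n : Int) (i : Nat) (hi : i < (pvGen zs w n).length) :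
    (pvGen zs w n)[i] = pvGenRow zs w (i : Int) := by
  unfold pvGen at hi ⊢
  rw [List.getElem_map, PySem.List.getElem_pyRange_one]
  norm_num

lemma pvGenRow_append_ne (zs : List Int) (x w r : Int) (h1 : r ≠ -1) (h2 : r ≠ x) :
    pvGenRow (zs ++ [x]) w r = pvGenRow zs w r := by
  unfold pvGenRow
  refine List.map_congr_left ?_
  intro c hc
  rw [PySem.List.mem_pyRange_one] at hc
  rw [pvGetD_app zs x c (-1) hc.1]
  by_cases g1 : c < (zs.length : Int)
  · rw [if_pos g1]
  · rw [if_neg g1, PySem.List.pyGetD_of_nonneg _ _ hc.1,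
      List.getD_eq_default _ _ (by omega)]
    by_cases g2 : c = (zs.length : Int)
    · rw [if_pos g2, if_neg (by omega : ¬ x = r), if_neg (by omega : ¬ (-1 : Int) = r)]
    · rw [if_neg g2]

lemma pvGenRow_append_self (zs : List Int) (x w : Int) (hx : 0 ≤ x)
    (_hw : (zs.length : Int) < w) :
    pvGenRow (zs ++ [x]) w x = (pvGenRow zs w x).set zs.length 0 := by
  refine List.ext_getElem (by simp [pvGenRow_length]) ?_
  intro i hi1 hi2
  have hiw : i < w.toNat := by rw [pvGenRow_length] at hi1; exact hi1
  rw [pvGenRow_getElem _ _ _ _ hi1, List.getElem_set]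
  by_cases h : zs.length = i
  · rw [if_pos h, if_pos]
    rw [pvGetD_app _ _ _ _ (Int.natCast_nonneg i), if_neg (by omega), if_pos (by omega)]
  · rw [if_neg h, pvGenRow_getElem _ _ _ _ (by rw [pvGenRow_length]; exact hiw)]
    rw [pvGetD_app _ _ _ _ (Int.natCast_nonneg i)]
    by_cases h3 : (i : Int) < (zs.length : Int)
    · rw [if_pos h3]
    · rw [if_neg h3, if_neg (by omega),
        PySem.List.pyGetD_of_nonneg _ _ (Int.natCast_nonneg i),
        List.getD_eq_default _ _ (by omega), if_neg (by omega : ¬ (-1 : Int) = x)]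

lemma pvGenRow_fresh (zs : List Int) (w r : Int) (h0 : 0 ≤ r) (h : ∀ x ∈ zs, x ≠ r) :
    pvGenRow zs w r = List.replicate w.toNat 1 := by
  refine List.ext_getElem (by simp [pvGenRow_length]) ?_
  intro i hi1 hi2
  rw [List.getElem_replicate, pvGenRow_getElem _ _ _ _ hi1, if_neg]
  by_cases hc : i < zs.length
  · have hm : PySem.List.pyGetD zs (i : Int) (-1) ∈ zs := by
      rw [PySem.List.pyGetD_of_nonneg _ _ (by positivity)]
      rw [List.getD_eq_getElem _ _ (by omega)]
      exact List.getElem_mem _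
    exact h _ hm
  · rw [PySem.List.pyGetD_of_nonneg _ _ (by positivity),
      List.getD_eq_default _ _ (by omega)]
    omega

lemma pvGen_succ (zs : List Int) (w n : Int) (hn : 0 ≤ n) :
    pvGen zs w (n + 1) = pvGen zs w n ++ [pvGenRow zs w n] := by
  unfold pvGen
  rw [PySem.List.pyRange_one_succ_right hn, List.map_append]
  rfl

lemma pvGen_append_ne (zs : List Int) (x w n : Int) (hx : n ≤ x) (_hn : 0 ≤ n) :
    pvGen (zs ++ [x]) w n = pvGen zs w n := by
  unfold pvGen
  refine List.map_congr_left ?_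
  intro r hr
  rw [PySem.List.mem_pyRange_one] at hr
  exact pvGenRow_append_ne zs x w r (by omega) (by omega)

lemma pvSetCell_eq (m : List (List Int)) (j c : Int) (h0 : 0 ≤ j)
    (h1 : j.toNat < m.length) (hc : 0 ≤ c) :
    pvSetCell m j c = m.set j.toNat ((m[j.toNat]).set c.toNat 0) := by
  unfold pvSetCell
  rw [PySem.List.pyGetD_eq_getElem _ _ h0 (by omega),
      PySem.List.pySetD_of_nonneg _ _ hc, PySem.List.pySetD_of_nonneg _ _ h0]

-- in-range write = extending the assignment (row j already existing)
lemma pvSetCell_gen (zs : List Int) (w n j : Int) (h0 : 0 ≤ j) (hj : j < n)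
    (hw : (zs.length : Int) < w) :
    pvSetCell (pvGen zs w n) j (zs.length : Int) = pvGen (zs ++ [j]) w n := by
  rw [pvSetCell_eq _ _ _ h0 (by rw [pvGen_length]; omega) (Int.natCast_nonneg _)]
  simp only [Int.toNat_natCast]
  refine List.ext_getElem (by simp [pvGen_length]) ?_
  intro i hi1 hi2
  rw [List.getElem_set, pvGen_getElem _ _ _ _ hi2]
  by_cases g1 : j.toNat = i
  · rw [if_pos g1, pvGen_getElem _ _ _ _ (by rw [pvGen_length]; omega)]
    have hji : ((j.toNat : Nat) : Int) = j := Int.toNat_of_nonneg h0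
    rw [← g1, hji]
    exact (pvGenRow_append_self zs j w h0 hw).symm
  · rw [if_neg g1, pvGen_getElem _ _ _ _ (by rw [pvGen_length] at hi2 ⊢; omega)]
    exact (pvGenRow_append_ne zs j w (i : Int) (by omega) (by omega)).symm

-- appended fresh row + write = extending the assignment with row index n
lemma pvSetCell_gen_grow (zs : List Int) (w n : Int) (hn : 0 ≤ n)
    (hw : (zs.length : Int) < w) (hb : ∀ x ∈ zs, x < n) :
    pvSetCell (pvGen zs w n ++ [List.replicate w.toNat 1]) n (zs.length : Int)
      = pvGen (zs ++ [n]) w (n + 1) := by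
  have hlen : (pvGen zs w n).length = n.toNat := pvGen_length zs w n
  rw [pvSetCell_eq _ _ _ hn (by simp [hlen]) (by positivity)]
  have hget : (pvGen zs w n ++ [List.replicate w.toNat 1])[n.toNat]'(by simp [hlen]) =
      List.replicate w.toNat 1 := by
    rw [List.getElem_append_right (by omega)]
    simp [hlen]
  rw [hget]
  rw [pvGen_succ _ _ _ hn, pvGen_append_ne zs n w n le_rfl hn]
  rw [List.set_append_right _ _ (by omega)]
  congr 1
  rw [hlen, Nat.sub_self]
  have h1 : pvGenRow (zs ++ [n]) w n = (pvGenRow zs w n).set zs.length 0 :=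
    pvGenRow_append_self zs n w hn hw
  rw [pvGenRow_fresh zs w n hn (fun x hx => by have := hb x hx; omega)] at h1
  simp [h1, Int.toNat_natCast]

-- consecutive integers starting at c
def pvChain : Int → List Int → Prop
  | _, [] => True
  | c, i :: t => i = c ∧ pvChain (c + 1) t

lemma pvChain_pyRange (n : Nat) : ∀ (a b : Int), b - a ≤ (n : Int) →
    pvChain a (PySem.List.pyRange a b 1) := by
  induction n with
  | zero =>
    intro a b h
    rw [PySem.List.pyRange_one_eq_nil (by omega)]
    trivial
  | succ k ih =>
    intro a b h
    by_cases hab : a < b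
    · rw [PySem.List.pyRange_one_cons hab]
      exact ⟨rfl, ih (a + 1) b (by omega)⟩
    · rw [PySem.List.pyRange_one_eq_nil (by omega)]
      trivial

-- the loop invariant: A's fold state is the matrix generated from B's fold state
lemma pv_loop (data : List Int) :
    ∀ (l : List Int) (nb : Int) (zs : List Int),
    1 ≤ nb →
    (∀ x ∈ zs, 0 ≤ x ∧ x < nb) →
    pvChain (zs.length : Int) l →
    (∀ i ∈ l, i < (data.length : Int) - 1) →
    (∀ i ∈ l, 1 ≤ PySem.List.pyGetD data (i + 1) 0) →
    l.foldl (pvStepA data) (pvGen zs ((data.length : Int) - 1) nb, nb)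
      = (pvGen (l.foldl (pvStepB data) (nb, zs)).2 ((data.length : Int) - 1)
           (l.foldl (pvStepB data) (nb, zs)).1,
         (l.foldl (pvStepB data) (nb, zs)).1) := by
  intro l
  induction l with
  | nil => intro nb zs _ _ _ _ _; rfl
  | cons i t ih =>
    intro nb zs hnb hzs hchain hiw hj
    obtain ⟨hi, hchain'⟩ := hchain
    subst hi
    have hiwi : ((zs.length : Nat) : Int) < (data.length : Int) - 1 := hiw _ (by simp)
    have hji : 1 ≤ PySem.List.pyGetD data ((zs.length : Nat) + 1) 0 := hj _ (by simp)
    have hw : (zs.length : Int) < (data.length : Int) - 1 := by omega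
    have hlen : ((pvGen zs ((data.length : Int) - 1) nb).length : Int) = nb := by
      rw [pvGen_length]; omega
    simp only [List.foldl_cons]
    by_cases hc : PySem.List.pyGetD data (((zs.length : Nat) : Int) + 1) 0 - 1 > nb - 1
    · have hstepA : pvStepA data (pvGen zs ((data.length : Int) - 1) nb, nb) ((zs.length : Nat) : Int)
          = (pvGen (zs ++ [nb]) ((data.length : Int) - 1) (nb + 1), nb + 1) := by
        unfold pvStepA
        rw [if_pos (by rw [hlen]; exact hc)]
        show (pvSetCell (pvGen zs ((data.length : Int) - 1) nb
            ++ [List.replicate ((data.length : Int) - 1).toNat 1]) (nb + 1 - 1) ((zs.length : Nat) : Int), nb + 1) = _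
        have h1 : nb + 1 - 1 = nb := by ring
        rw [h1, pvSetCell_gen_grow zs ((data.length : Int) - 1) nb (by omega) hw
          (fun x hx => (hzs x hx).2)]
      have hstepB : pvStepB data (nb, zs) ((zs.length : Nat) : Int) = (nb + 1, zs ++ [nb]) := by
        unfold pvStepB
        show (max nb (min (PySem.List.pyGetD data (((zs.length : Nat) : Int) + 1) 0 - 1) nb + 1),
          zs ++ [min (PySem.List.pyGetD data (((zs.length : Nat) : Int) + 1) 0 - 1) nb]) = _
        rw [min_eq_right (by omega : nb ≤ PySem.List.pyGetD data (((zs.length : Nat) : Int) + 1) 0 - 1),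
          max_eq_right (by omega : nb ≤ nb + 1)]
      rw [hstepA, hstepB]
      refine ih (nb + 1) (zs ++ [nb]) (by omega) ?_ ?_ ?_ ?_
      · intro x hx
        rcases List.mem_append.1 hx with h | h
        · have := hzs x h; exact ⟨this.1, by omega⟩
        · simp only [List.mem_singleton] at h; subst h; exact ⟨by omega, by omega⟩
      · have : (((zs ++ [nb]).length : Nat) : Int) = (zs.length : Int) + 1 := by
          simp
        rw [this]
        exact hchain'
      · intro x hx; exact hiw x (by simp [hx])
      · intro x hx; exact hj x (by simp [hx])
    · have hstepA : pvStepA data (pvGen zs ((data.length : Int) - 1) nb, nb) ((zs.length : Nat) : Int)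
          = (pvGen (zs ++ [PySem.List.pyGetD data (((zs.length : Nat) : Int) + 1) 0 - 1]) ((data.length : Int) - 1) nb, nb) := by
        unfold pvStepA
        rw [if_neg (by rw [hlen]; exact hc)]
        show (pvSetCell (pvGen zs ((data.length : Int) - 1) nb)
            (PySem.List.pyGetD data (((zs.length : Nat) : Int) + 1) 0 - 1) ((zs.length : Nat) : Int), nb) = _
        rw [pvSetCell_gen zs ((data.length : Int) - 1) nb
          (PySem.List.pyGetD data (((zs.length : Nat) : Int) + 1) 0 - 1) (by omega) (by omega) hw]
      have hstepB : pvStepB data (nb, zs) ((zs.length : Nat) : Int)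
          = (nb, zs ++ [PySem.List.pyGetD data (((zs.length : Nat) : Int) + 1) 0 - 1]) := by
        unfold pvStepB
        show (max nb (min (PySem.List.pyGetD data (((zs.length : Nat) : Int) + 1) 0 - 1) nb + 1),
          zs ++ [min (PySem.List.pyGetD data (((zs.length : Nat) : Int) + 1) 0 - 1) nb]) = _
        rw [min_eq_left (by omega : PySem.List.pyGetD data (((zs.length : Nat) : Int) + 1) 0 - 1 ≤ nb),
          max_eq_left (by omega : PySem.List.pyGetD data (((zs.length : Nat) : Int) + 1) 0 - 1 + 1 ≤ nb)]
      rw [hstepA, hstepB]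
      refine ih nb (zs ++ [PySem.List.pyGetD data (((zs.length : Nat) : Int) + 1) 0 - 1]) hnb ?_ ?_ ?_ ?_
      · intro x hx
        rcases List.mem_append.1 hx with h | h
        · exact hzs x h
        · simp only [List.mem_singleton] at h; subst h; exact ⟨by omega, by omega⟩
      · have : (((zs ++ [PySem.List.pyGetD data (((zs.length : Nat) : Int) + 1) 0 - 1]).length : Nat) : Int)
            = (zs.length : Int) + 1 := by simp
        rw [this]
        exact hchain'
      · intro x hx; exact hiw x (by simp [hx])
      · intro x hx; exact hj x (by simp [hx])

lemma pvStepB_len (data : List Int) :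
    ∀ (l : List Int) (nb : Int) (zs : List Int),
    ((l.foldl (pvStepB data) (nb, zs)).2).length = zs.length + l.length := by
  intro l
  induction l with
  | nil => intro nb zs; simp
  | cons i t ih =>
    intro nb zs
    simp only [List.foldl_cons]
    rw [show pvStepB data (nb, zs) i
        = (max nb (min (PySem.List.pyGetD data (i + 1) 0 - 1) nb + 1),
           zs ++ [min (PySem.List.pyGetD data (i + 1) 0 - 1) nb]) from rfl]
    rw [ih]
    simp
    omega

-- pvGen with default -1 equals B's comprehension (default 0) once every column is assigned
lemma pvGen_eq_matrix (zs : List Int) (w n : Int) (hlen : (zs.length : Int) = w) :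
    pvGen zs w n = (PySem.List.pyRange 0 n 1).map (fun r =>
      (PySem.List.pyRange 0 w 1).map (fun c =>
        if PySem.List.pyGetD zs c 0 = r then (0 : Int) else 1)) := by
  unfold pvGen pvGenRow
  refine List.map_congr_left ?_
  intro r _
  refine List.map_congr_left ?_
  intro c hc
  rw [PySem.List.mem_pyRange_one] at hc
  rw [PySem.List.pyGetD_eq_getElem _ _ hc.1 (by omega),
      PySem.List.pyGetD_eq_getElem _ _ hc.1 (by omega)]


-- ===== VERDICT (by name: the statement is the Claim_ definition above) =====
theorem cognitive_algorithm_spec : Claim_equal_cognitive_algorithm := by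
  intro data _ hpre
  obtain ⟨h2, hpos⟩ := hpre
  have hw1 : (1 : Int) ≤ (data.length : Int) - 1 := by
    have : (2 : Int) ≤ (data.length : Int) := by exact_mod_cast h2
    omega
  show cognitive_algorithm data = cognitive_algorithm_alt data
  simp only [cognitive_algorithm, cognitive_algorithm_alt]
  -- the initial matrix is the generated matrix for assignment [0]
  have hinit : pvSetCell [List.replicate ((data.length : Int) - 1).toNat 1] 0 0
      = pvGen [0] ((data.length : Int) - 1) 1 := by
    rw [pvSetCell_eq _ _ _ le_rfl (by simp) le_rfl]
    have hr : pvGen [0] ((data.length : Int) - 1) 1 = [pvGenRow [0] ((data.length : Int) - 1) 0] := by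
      unfold pvGen
      rw [PySem.List.pyRange_one_cons (by norm_num : (0 : Int) < 1),
        PySem.List.pyRange_one_eq_nil (by norm_num : (1 : Int) ≤ 0 + 1)]
      rfl
    rw [hr]
    have h0 : pvGenRow ([] ++ [(0 : Int)]) ((data.length : Int) - 1) 0
        = (pvGenRow [] ((data.length : Int) - 1) 0).set 0 0 :=
      pvGenRow_append_self [] 0 ((data.length : Int) - 1) le_rfl (by simpa using hw1)
    rw [pvGenRow_fresh [] ((data.length : Int) - 1) 0 le_rfl (by simp)] at h0
    simp only [List.nil_append] at h0
    simp [h0]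
  rw [hinit]
  have hbound : ∀ i ∈ PySem.List.pyRange 1 ((data.length : Int) - 1) 1,
      1 ≤ PySem.List.pyGetD data (i + 1) 0 := by
    intro i hi
    rw [PySem.List.mem_pyRange_one] at hi
    have h1 : (0 : Int) ≤ i + 1 := by omega
    have hlt : i + 1 < (data.length : Int) := by omega
    rw [PySem.List.pyGetD_eq_getElem data (0 : Int) h1 hlt]
    have hk : (i + 1).toNat - 2 < (data.drop 2).length := by
      rw [List.length_drop]; omega
    have hmem : data[(i + 1).toNat]'(by omega) ∈ data.drop 2 := by
      have he : (data.drop 2)[(i + 1).toNat - 2]'hk = data[(i + 1).toNat]'(by omega) := by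
        rw [List.getElem_drop]; congr 1; omega
      rw [← he]
      exact List.getElem_mem hk
    exact hpos _ hmem
  have key := pv_loop data (PySem.List.pyRange 1 ((data.length : Int) - 1) 1) 1 [0]
    le_rfl (by simp)
    (by simpa using pvChain_pyRange ((data.length : Int) - 2).toNat 1 ((data.length : Int) - 1) (by omega))
    (fun i hi => ((PySem.List.mem_pyRange_one).1 hi).2)
    hbound
  rw [key]
  have hflen : (((PySem.List.pyRange 1 ((data.length : Int) - 1) 1).foldl (pvStepB data) (1, [0])).2.length : Int)
      = (data.length : Int) - 1 := by
    rw [pvStepB_len data _ 1 [0], PySem.List.length_pyRange_one]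
    have h3 : (2 : Int) ≤ (data.length : Int) := by exact_mod_cast h2
    simp only [List.length_singleton]
    push_cast [Int.toNat_of_nonneg (by omega : (0 : Int) ≤ (data.length : Int) - 1 - 1)]
    omega
  rw [pvGen_eq_matrix _ _ _ hflen]
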